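-- pv_equiv track=rewrite | github.com/ghostselfbot/ghost | utils/fonts.py | bypass
-- ===== SOURCE A (Python) =====
-- bypass_fonts = {
--     'a': '𝚊',
--     'b': '𝚋',
--     'c': '𝚌',
--     'd': '𝚍',
--     'e': '𝚎',
--     'f': '𝚏',
--     'g': '𝚐',
--     'h': '𝚑',
--     'i': '𝚒',
--     'j': '𝚓',
--     'k': '𝚔',
--     'l': '𝚕',
--     'm': '𝚖',
--     'n': '𝚗',
--     'o': '𝚘',
--     'p': '𝚙',
--     'q': '𝚚',
--     'r': '𝚛',
--     's': '𝚜',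
--     't': '𝚝',
--     'u': '𝚞',
--     'v': '𝚟',
--     'w': '𝚠',
--     'x': '𝚡',
--     'y': '𝚢',
--     'z': '𝚣'
-- }
--
-- def bypass(text):
--     text = text.lower()
--     result = ""
--     for char in text:
--         if char in bypass_fonts:
--             result += bypass_fonts[char]
--         else:
--             result += char
--     return result
-- ===== SOURCE B (Python) =====
-- def bypass(text):
--     text = text.lower()
--     for i in range(26):
--         text = text.replace(chr(97 + i), chr(0x1D68A + i))
--     return text
-- ===== Notes on version B (the rewrite author's own statement) =====
-- stated objective: faster
-- what changed: Replaces the per-character dict-lookup loop with 26 staged whole-string str.replace passes (one per letter, letter i -> chr(0x1D68A+i)), eliminating the lookup table and the Python-level character loop; correct because the substituted glyphs are outside a-z so later passes never touch earlier output.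
import Mathlib
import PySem

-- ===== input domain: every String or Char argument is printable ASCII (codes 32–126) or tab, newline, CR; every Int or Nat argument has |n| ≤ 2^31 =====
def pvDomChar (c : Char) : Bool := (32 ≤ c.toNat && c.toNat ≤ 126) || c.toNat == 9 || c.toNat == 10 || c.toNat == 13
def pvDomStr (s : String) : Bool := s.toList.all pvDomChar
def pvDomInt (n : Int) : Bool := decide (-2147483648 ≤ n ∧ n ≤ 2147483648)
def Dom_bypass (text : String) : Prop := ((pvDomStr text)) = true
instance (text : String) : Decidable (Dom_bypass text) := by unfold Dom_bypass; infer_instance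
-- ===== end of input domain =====

-- B replaces the per-char table-lookup loop by 26 staged whole-string replace passes; objective: faster (C-level passes in Python).

-- ===== PORT A =====
def bypass_fonts : PySem.Dict Char String := PySem.Dict.mk
  [('a', "𝚊"), ('b', "𝚋"), ('c', "𝚌"), ('d', "𝚍"), ('e', "𝚎"), ('f', "𝚏"),
   ('g', "𝚐"), ('h', "𝚑"), ('i', "𝚒"), ('j', "𝚓"), ('k', "𝚔"), ('l', "𝚕"),
   ('m', "𝚖"), ('n', "𝚗"), ('o', "𝚘"), ('p', "𝚙"), ('q', "𝚚"), ('r', "𝚛"),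
   ('s', "𝚜"), ('t', "𝚝"), ('u', "𝚞"), ('v', "𝚟"), ('w', "𝚠"), ('x', "𝚡"),
   ('y', "𝚢"), ('z', "𝚣")]

def bypass (text : String) : String :=
  let t := PySem.Str.lower text
  t.toList.foldl (fun result char =>
    match bypass_fonts.get? char with
    | some v => result ++ v
    | none => result ++ String.ofList [char]) ""

-- ===== PORT B =====
def bypass_alt (text : String) : String :=
  (PySem.List.pyRange 0 26 1).foldl
    (fun t i =>
      PySem.Str.replace t (String.ofList [Char.ofNat (97 + i).toNat])
        (String.ofList [Char.ofNat (0x1D68A + i).toNat]))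
    (PySem.Str.lower text)

-- ===== PRECONDITION & SPEC =====
def Spec_bypass (text : String) (out : String) : Prop := out = bypass_alt text
instance (text : String) (out : String) : Decidable (Spec_bypass text out) := by unfold Spec_bypass; infer_instance

-- ===== CLAIM (what is proved, stated in full; the proofs are below) =====
def Claim_equal_bypass : Prop := ∀ (text : String), Dom_bypass text → Spec_bypass text (bypass text)

-- ===== LEMMAS AND PROOFS =====

-- the common intermediate: per-character substitution on List Char
def subChar (c : Char) : List Char :=
  if 97 ≤ c.toNat ∧ c.toNat ≤ 122 then [Char.ofNat (0x1D68A + c.toNat - 97)] else [c]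

-- A's per-char dict step equals subChar
theorem step_eq (c : Char) :
    (match bypass_fonts.get? c with
     | some v => v
     | none => String.ofList [c]) = String.ofList (subChar c) := by
  by_cases h : 97 ≤ c.toNat ∧ c.toNat ≤ 122
  · obtain ⟨h1, h2⟩ := h
    have hc : c = Char.ofNat c.toNat := (Char.ofNat_toNat c).symm
    interval_cases h3 : c.toNat <;> (rw [hc]; decide)
  · have ha : ∀ k : Char, 97 ≤ k.toNat → k.toNat ≤ 122 → c ≠ k := by
      intro k hk1 hk2 he; exact h ⟨he ▸ hk1, he ▸ hk2⟩
    have hget : bypass_fonts.get? c = none := by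
      simp only [bypass_fonts, PySem.Dict.get?_mk_cons]
      rw [if_neg, if_neg, if_neg, if_neg, if_neg, if_neg, if_neg, if_neg, if_neg,
          if_neg, if_neg, if_neg, if_neg, if_neg, if_neg, if_neg, if_neg, if_neg,
          if_neg, if_neg, if_neg, if_neg, if_neg, if_neg, if_neg, if_neg]
      · simp [PySem.Dict.get?]
      all_goals (simp only [beq_iff_eq]; intro he; exact ha _ (by decide) (by decide) he.symm)
    simp [hget, subChar, h]

theorem foldl_A (cs : List Char) (acc : String) :
    cs.foldl (fun result char =>
      match bypass_fonts.get? char with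
      | some v => result ++ v
      | none => result ++ String.ofList [char]) acc
    = acc ++ String.ofList (cs.flatMap subChar) := by
  induction cs generalizing acc with
  | nil => simp
  | cons c cs ih =>
    simp only [List.foldl_cons, List.flatMap_cons, ih]
    have hs := step_eq c
    cases hg : bypass_fonts.get? c <;>
      simp only [hg] at hs <;>
      simp [← hs, String.ofList_append, String.append_assoc]

-- single-char replace is a flatMap
theorem go_single (c : Char) (new : List Char) (l : List Char) :
    ∀ (fuel : Nat) (acc : List Char), l.length ≤ fuel →
      PySem.Chars.replace.go [c] new fuel l acc
        = acc.reverse ++ l.flatMap (fun x => if x = c then new else [x]) := by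
  induction l with
  | nil =>
    intro fuel acc _
    cases fuel <;> simp [PySem.Chars.replace.go]
  | cons x t ih =>
    intro fuel acc hf
    cases fuel with
    | zero => simp at hf
    | succ n =>
      simp only [PySem.Chars.replace.go]
      by_cases hx : x = c
      · subst hx
        rw [if_pos (by simp [List.isPrefixOf])]
        simp only [List.length_cons] at hf
        simp only [List.length_cons, List.length_nil, List.drop_succ_cons, List.drop_zero]
        rw [ih n _ (by omega)]
        simp
      · rw [if_neg (by simp [List.isPrefixOf]; exact fun h => hx h.symm)]
        simp only [List.length_cons] at hf
        rw [ih n _ (by omega)]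
        simp [hx]

theorem rep1 (s : List Char) (c : Char) (new : List Char) :
    PySem.Chars.replace s [c] new = s.flatMap (fun x => if x = c then new else [x]) := by
  rw [PySem.Chars.replace]
  simp [go_single c new s s.length [] le_rfl]

-- a fold of flatMap-passes acts characterwise
theorem foldl_flatMap_hom (f : Int → Char → List Char) (L : List Int) (s : List Char) :
    L.foldl (fun l i => l.flatMap (f i)) s
      = s.flatMap (fun x => L.foldl (fun l i => l.flatMap (f i)) [x]) := by
  induction L generalizing s with
  | nil => simp
  | cons i L ih =>
    simp only [List.foldl_cons]
    rw [ih (s.flatMap (f i)), List.flatMap_assoc]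
    congr 1
    funext x
    simp only [List.flatMap_cons, List.flatMap_nil, List.append_nil]
    exact (ih (f i x)).symm

def subStep (i : Int) (x : Char) : List Char :=
  if x = Char.ofNat (97 + i).toNat then [Char.ofNat (0x1D68A + i).toNat] else [x]

-- running the 26 passes on a single domain character gives subChar
theorem perChar (c : Char) (hd : pvDomChar c = true) :
    (PySem.List.pyRange 0 26 1).foldl (fun l i => l.flatMap (subStep i)) [c] = subChar c := by
  have hc : c = Char.ofNat c.toNat := (Char.ofNat_toNat c).symm
  have hb : c.toNat = 9 ∨ c.toNat = 10 ∨ c.toNat = 13 ∨ (32 ≤ c.toNat ∧ c.toNat ≤ 126) := by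
    simp [pvDomChar] at hd; omega
  rcases hb with h | h | h | ⟨h1, h2⟩
  · rw [hc, h]; decide
  · rw [hc, h]; decide
  · rw [hc, h]; decide
  · interval_cases h3 : c.toNat <;> (rw [hc]; decide)

theorem lowerChar_dom (c : Char) (hd : pvDomChar c = true) :
    pvDomChar (PySem.Chars.lowerChar c) = true := by
  have hc : c = Char.ofNat c.toNat := (Char.ofNat_toNat c).symm
  have hb : c.toNat = 9 ∨ c.toNat = 10 ∨ c.toNat = 13 ∨ (32 ≤ c.toNat ∧ c.toNat ≤ 126) := by
    simp [pvDomChar] at hd; omega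
  rcases hb with h | h | h | ⟨h1, h2⟩
  · rw [hc, h]; decide
  · rw [hc, h]; decide
  · rw [hc, h]; decide
  · interval_cases h3 : c.toNat <;> (rw [hc]; decide)

theorem foldl_B (cs : List Char) :
    (PySem.List.pyRange 0 26 1).foldl
      (fun t i =>
        PySem.Str.replace t (String.ofList [Char.ofNat (97 + i).toNat])
          (String.ofList [Char.ofNat (0x1D68A + i).toNat]))
      (String.ofList cs)
    = String.ofList ((PySem.List.pyRange 0 26 1).foldl (fun l i => l.flatMap (subStep i)) cs) := by
  generalize PySem.List.pyRange 0 26 1 = L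
  induction L generalizing cs with
  | nil => simp
  | cons i L ih =>
    simp only [List.foldl_cons]
    rw [show PySem.Str.replace (String.ofList cs) (String.ofList [Char.ofNat (97 + i).toNat])
          (String.ofList [Char.ofNat (0x1D68A + i).toNat])
        = String.ofList (cs.flatMap (subStep i)) from ?_, ih]
    simp only [PySem.Str.replace, String.toList_ofList, rep1]
    rfl

-- ===== VERDICT (by name: the statement is the Claim_ definition above) =====
set_option maxHeartbeats 1000000 in
theorem bypass_spec : Claim_equal_bypass := by
  intro text hdom
  unfold Spec_bypass
  have hcs : ∀ c ∈ (PySem.Str.lower text).toList, pvDomChar c = true := by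
    intro c hc
    rw [PySem.Str.toList_lower] at hc
    obtain ⟨d, hd, rfl⟩ := List.mem_map.mp hc
    exact lowerChar_dom d ((List.all_eq_true.mp hdom) d hd)
  have hA : bypass text
      = String.ofList ((PySem.Str.lower text).toList.flatMap subChar) := by
    simp only [bypass]
    rw [foldl_A]
    simp
  have hB : bypass_alt text
      = String.ofList ((PySem.Str.lower text).toList.flatMap subChar) := by
    have hfb := foldl_B (PySem.Str.lower text).toList
    rw [String.ofList_toList] at hfb
    simp only [bypass_alt]
    rw [hfb, foldl_flatMap_hom subStep]
    exact congrArg String.ofList (List.flatMap_congr (fun c hc => perChar c (hcs c hc)))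
  rw [hA, hB]
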